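-- pv_equiv track=rewrite | github.com/garciparedes/binarysearch | problems/1008_unique_people_in_contact_list.py | solve
-- ===== SOURCE A (Python) =====
-- def solve(contacts):
--     seen = set()
--     ans = 0
--     for group in contacts:
--         valid = True
--         for email in group:
--             if email in seen:
--                 valid = False
--             seen.add(email)
--
--         if valid:
--             ans += 1
--     return ans
-- ===== SOURCE B (Python) =====
-- def solve(contacts):
--     # Pass 1: index each email by the first group it appears in.
--     first = {}
--     for i, group in enumerate(contacts):
--         for e in group:
--             first.setdefault(e, i)
--     # Pass 2: a group counts iff it has no internal duplicates and it is the
--     # first occurrence of every one of its emails.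
--     ans = 0
--     for i, group in enumerate(contacts):
--         if len(set(group)) == len(group) and all(first[e] == i for e in group):
--             ans += 1
--     return ans
-- ===== Notes on version B (the rewrite author's own statement) =====
-- stated objective: alternative
-- what changed: Replaces the single pass with a running seen-set by two staged passes: a first pass builds a first-occurrence index (email -> index of first group containing it), and a second stateless pass counts groups that are duplicate-free and the first occurrence of all their emails.
import Mathlib
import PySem

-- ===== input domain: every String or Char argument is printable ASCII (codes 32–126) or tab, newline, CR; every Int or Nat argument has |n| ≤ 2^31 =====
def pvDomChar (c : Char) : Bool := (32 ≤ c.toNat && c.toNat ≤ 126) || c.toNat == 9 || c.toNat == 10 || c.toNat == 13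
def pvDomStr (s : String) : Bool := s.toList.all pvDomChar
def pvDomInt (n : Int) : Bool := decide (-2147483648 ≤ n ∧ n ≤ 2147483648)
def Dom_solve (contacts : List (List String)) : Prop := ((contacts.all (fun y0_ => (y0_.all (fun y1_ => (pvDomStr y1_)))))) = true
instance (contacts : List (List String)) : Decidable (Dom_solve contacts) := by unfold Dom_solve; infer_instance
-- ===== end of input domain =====

-- B replaces A's single pass with a running seen-set by two staged passes: first build a
-- first-occurrence index of every email, then count groups statelessly (objective: alternative).

-- ===== PORT A =====
def solve (contacts : List (List String)) : Int :=
  (contacts.foldl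
    (fun (st : PySem.Set String × Int) group =>
      let inner := group.foldl
        (fun (p : Bool × PySem.Set String) email =>
          ((if PySem.Set.contains p.2 email then false else p.1), PySem.Set.add p.2 email))
        (true, st.1)
      (inner.2, if inner.1 then st.2 + 1 else st.2))
    (PySem.Set.empty, 0)).2

-- ===== PORT B =====
def solve_alt (contacts : List (List String)) : Int :=
  let first : PySem.Dict String Int :=
    (PySem.List.enumerate contacts 0).foldl
      (fun d p => p.2.foldl (fun d e => PySem.Dict.setdefault d e p.1) d)
      PySem.Dict.empty
  (PySem.List.enumerate contacts 0).foldl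
    (fun ans p =>
      if (PySem.Set.len (PySem.Set.ofList p.2) == (p.2.length : Int))
           && p.2.all (fun e => PySem.Dict.get? first e == some p.1)
      then ans + 1 else ans)
    0

-- ===== PRECONDITION & SPEC =====
def Spec_solve (contacts : List (List String)) (out : Int) : Prop := out = solve_alt contacts
instance (contacts : List (List String)) (out : Int) : Decidable (Spec_solve contacts out) := by unfold Spec_solve; infer_instance

-- ===== CLAIM (what is proved, stated in full; the proofs are below) =====
def Claim_equal_solve : Prop := ∀ (contacts : List (List String)), Dom_solve contacts → Spec_solve contacts (solve contacts)

-- ===== LEMMAS AND PROOFS =====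

-- Common reference count: pvN pre l = number of groups of l all of whose emails avoid the
-- accumulated prefix 'pre' (and avoid each other), with pre growing group by group.
def pvN (pre : List String) : List (List String) → Int
  | [] => 0
  | g :: rest => (if (∀ e ∈ g, e ∉ pre) ∧ g.Nodup then 1 else 0) + pvN (pre ++ g) rest

-- first-occurrence lookup: pvG l s x = some (s + first index in l of a group containing x)
def pvG : List (List String) → Int → String → Option Int
  | [], _, _ => none
  | g :: rest, s, x => if x ∈ g then some s else pvG rest (s + 1) x

-- ofList keeps a subsequence of the input
lemma ofList_sublist (xs : List String) : (PySem.Set.ofList xs).Sublist xs := by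
  induction xs with
  | nil => simp [PySem.Set.ofList]
  | cons x xs ih =>
    rw [PySem.Set.ofList_cons]
    refine List.Sublist.cons₂ x ?_
    exact List.Sublist.trans (by simp [PySem.Set.discard, List.filter_sublist]) ih

lemma len_ofList_eq_iff (xs : List String) :
    PySem.Set.len (PySem.Set.ofList xs) = (xs.length : Int) ↔ xs.Nodup := by
  constructor
  · intro h
    have hlen : (PySem.Set.ofList xs).length = xs.length := by
      simpa [PySem.Set.len] using h
    have := List.Sublist.eq_of_length (ofList_sublist xs) hlen
    simpa [this] using PySem.Set.nodup_ofList (α := String) xs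
  · intro h
    simp [PySem.Set.len, PySem.Set.ofList_eq_self_of_nodup xs h]

-- characterisation of A's inner loop
lemma inner_loop (group : List String) (seen : PySem.Set String) (b : Bool) :
    group.foldl
      (fun (p : Bool × PySem.Set String) email =>
        ((if PySem.Set.contains p.2 email then false else p.1), PySem.Set.add p.2 email))
      (b, seen)
    = ((b && decide ((∀ e ∈ group, e ∉ seen) ∧ group.Nodup)), PySem.Set.update seen group) := by
  induction group generalizing seen b with
  | nil => simp [PySem.Set.update]
  | cons e rest ih =>
    rw [List.foldl_cons, ih, PySem.Set.update_cons]
    refine Prod.ext_iff.mpr ⟨?_, rfl⟩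
    show ((if PySem.Set.contains seen e then false else b)
        && decide ((∀ x ∈ rest, x ∉ PySem.Set.add seen e) ∧ rest.Nodup))
      = (b && decide ((∀ x ∈ e :: rest, x ∉ seen) ∧ (e :: rest).Nodup))
    by_cases hm : e ∈ seen
    · rw [if_pos ((PySem.Set.contains_iff seen e).2 hm)]
      simp [hm]
    · rw [if_neg (fun h => hm ((PySem.Set.contains_iff seen e).1 h))]
      congr 1
      rw [decide_eq_decide]
      simp only [PySem.Set.mem_add, List.mem_cons, List.nodup_cons]
      constructor
      · rintro ⟨h1, h2⟩
        refine ⟨?_, ?_, h2⟩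
        · intro x hx
          rcases hx with rfl | hx
          · exact hm
          · exact fun hs => (h1 x hx) (Or.inl hs)
        · exact fun hre => (h1 e hre) (Or.inr rfl)
      · rintro ⟨h1, h2, h3⟩
        refine ⟨fun x hx => ?_, h3⟩
        rintro (hs | rfl)
        · exact h1 x (Or.inr hx) hs
        · exact h2 hx

-- A's fold (with the inner loop already characterised) computes pvN
lemma solve_fold (l : List (List String)) (seen : PySem.Set String) (pre : List String)
    (ans : Int) (hmem : ∀ x, x ∈ seen ↔ x ∈ pre) :
    (l.foldl
      (fun (st : PySem.Set String × Int) group =>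
        (PySem.Set.update st.1 group,
         if decide ((∀ e ∈ group, e ∉ st.1) ∧ group.Nodup) = true then st.2 + 1 else st.2))
      (seen, ans)).2 = ans + pvN pre l := by
  induction l generalizing seen pre ans with
  | nil => simp [pvN]
  | cons g rest ih =>
    rw [List.foldl_cons]
    rw [ih (PySem.Set.update seen g) (pre ++ g) _
          (by intro x; simp [PySem.Set.mem_update, hmem x])]
    have hd : ((∀ e ∈ g, e ∉ seen) ∧ g.Nodup) ↔ ((∀ e ∈ g, e ∉ pre) ∧ g.Nodup) := by
      constructor
      · rintro ⟨h1, h2⟩; exact ⟨fun e he hp => h1 e he ((hmem e).2 hp), h2⟩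
      · rintro ⟨h1, h2⟩; exact ⟨fun e he hs => h1 e he ((hmem e).1 hs), h2⟩
    rw [pvN]
    by_cases h : (∀ e ∈ g, e ∉ pre) ∧ g.Nodup
    · rw [if_pos (by simpa [hd] using h), if_pos h]; ring
    · rw [if_neg (by simpa [hd] using h), if_neg h]; simp

lemma solve_eq_pvN (contacts : List (List String)) : solve contacts = pvN [] contacts := by
  unfold solve
  have hfun :
      (fun (st : PySem.Set String × Int) group =>
        let inner := group.foldl
          (fun (p : Bool × PySem.Set String) email =>
            ((if PySem.Set.contains p.2 email then false else p.1), PySem.Set.add p.2 email))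
          (true, st.1)
        (inner.2, if inner.1 then st.2 + 1 else st.2))
      = (fun (st : PySem.Set String × Int) group =>
        (PySem.Set.update st.1 group,
         if decide ((∀ e ∈ group, e ∉ st.1) ∧ group.Nodup) = true then st.2 + 1 else st.2)) := by
    funext st group
    simp only [inner_loop, Bool.true_and]
  rw [hfun, solve_fold contacts PySem.Set.empty [] 0 (by intro x; simp [PySem.Set.empty])]
  simp

-- B's setdefault inner loop
lemma setdefault_inner (g : List String) (d : PySem.Dict String Int) (s : Int) (x : String) :
    PySem.Dict.get? (g.foldl (fun d e => PySem.Dict.setdefault d e s) d) x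
      = if d.contains x then d.get? x else if x ∈ g then some s else none := by
  induction g generalizing d with
  | nil =>
    simp only [List.foldl_nil, List.not_mem_nil, if_false]
    by_cases h : d.contains x
    · rw [if_pos h]
    · have hn : d.get? x = none :=
        (PySem.Dict.get?_eq_none_iff_contains d x).2 (by simpa using h)
      rw [if_neg (by simp [h]), hn]
  | cons e rest ih =>
    rw [List.foldl_cons, ih]
    by_cases hc : d.contains e
    · rw [PySem.Dict.setdefault_of_contains d s hc]
      by_cases hx : d.contains x
      · simp [hx]
      · simp only [hx, List.mem_cons]
        by_cases hxe : x = e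
        · subst hxe; exact absurd hc (by simp [hx])
        · simp [hxe]
    · rw [PySem.Dict.setdefault_of_not_contains d s (by simpa using hc)]
      by_cases hxe : x = e
      · subst hxe
        rw [if_pos (PySem.Dict.contains_insert_self d x s), PySem.Dict.get?_insert_self]
        simp [hc]
      · rw [PySem.Dict.get?_insert_of_ne d s hxe]
        have hct : (d.insert e s).contains x = d.contains x := by
          rw [PySem.Dict.contains_insert]
          simp [show (x == e) = false from by simp [hxe]]
        rw [hct]
        by_cases hx : d.contains x
        · simp [hx]
        · simp only [hx, List.mem_cons, hxe, false_or]

-- B's first pass computes pvG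
lemma build_first (l : List (List String)) (s : Int) (d : PySem.Dict String Int) (x : String) :
    PySem.Dict.get?
      ((PySem.List.enumerate l s).foldl
        (fun d p => p.2.foldl (fun d e => PySem.Dict.setdefault d e p.1) d) d) x
      = if d.contains x then d.get? x else pvG l s x := by
  induction l generalizing s d with
  | nil =>
    simp only [PySem.List.enumerate_nil, List.foldl_nil, pvG]
    by_cases hx : d.contains x
    · simp [hx]
    · have hn : d.get? x = none :=
        (PySem.Dict.get?_eq_none_iff_contains d x).2 (by simpa using hx)
      simp [hx, hn]
  | cons g rest ih =>
    rw [PySem.List.enumerate_cons, List.foldl_cons]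
    rw [ih]
    have hinner := setdefault_inner g d s x
    have hcont : (g.foldl (fun d e => PySem.Dict.setdefault d e s) d).contains x
        = (d.contains x || decide (x ∈ g)) := by
      rw [PySem.Dict.contains_eq_isSome_get?, hinner]
      by_cases hx : d.contains x
      · rw [if_pos hx, ← PySem.Dict.contains_eq_isSome_get?, hx, Bool.true_or]
      · simp only [hx, Bool.false_or]
        by_cases hg : x ∈ g <;> simp [hg]
    rw [hcont, hinner, pvG]
    by_cases hx : d.contains x
    · simp [hx]
    · by_cases hg : x ∈ g <;> simp [hx, hg]

lemma pvG_bound (l : List (List String)) (s : Int) (x : String) (v : Int)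
    (h : pvG l s x = some v) : s ≤ v ∧ v < s + l.length := by
  induction l generalizing s with
  | nil => simp [pvG] at h
  | cons g rest ih =>
    rw [pvG] at h
    by_cases hg : x ∈ g
    · rw [if_pos hg, Option.some_inj] at h
      subst h
      refine ⟨le_refl s, ?_⟩
      simp only [List.length_cons]
      push_cast
      omega
    · rw [if_neg hg] at h
      obtain ⟨h1, h2⟩ := ih (s + 1) h
      refine ⟨by omega, ?_⟩
      simp only [List.length_cons] at *
      push_cast at h2 ⊢
      omega

lemma pvG_append (xs ys : List (List String)) (s : Int) (x : String) :
    pvG (xs ++ ys) s x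
      = if x ∈ xs.flatten then pvG xs s x else pvG ys (s + xs.length) x := by
  induction xs generalizing s with
  | nil => simp
  | cons g rest ih =>
    by_cases hg : x ∈ g
    · simp [pvG, hg]
    · rw [List.cons_append, pvG, if_neg hg, ih, pvG, if_neg hg]
      have hmemiff : x ∈ (g :: rest).flatten ↔ x ∈ rest.flatten := by simp [hg]
      rw [if_congr hmemiff rfl rfl]
      by_cases hr : x ∈ rest.flatten
      · simp [hr]
      · rw [if_neg hr, if_neg hr]
        congr 1
        simp only [List.length_cons]
        push_cast
        ring

-- key per-group fact: for e in the group at index j, the first-occurrence index is j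
-- exactly when e avoids all previous groups
lemma pvG_eq_iff (contacts : List (List String)) (j : Nat) (g : List String)
    (rest : List (List String)) (hdrop : contacts.drop j = g :: rest)
    (e : String) (he : e ∈ g) :
    pvG contacts 0 e = some (j : Int) ↔ e ∉ (contacts.take j).flatten := by
  have hsplit : contacts = contacts.take j ++ (g :: rest) := by
    conv_lhs => rw [← List.take_append_drop j contacts, hdrop]
  have hjlen : (contacts.take j).length = j := by
    have hle : j ≤ contacts.length := by
      by_contra h
      rw [List.drop_eq_nil_of_le (by omega)] at hdrop
      simp at hdrop
    simp [List.length_take, Nat.min_eq_left hle]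
  constructor
  · intro h hmem
    rw [hsplit, pvG_append, if_pos hmem] at h
    obtain ⟨_, h2⟩ := pvG_bound _ _ _ _ h
    rw [hjlen] at h2
    omega
  · intro hmem
    rw [hsplit, pvG_append, if_neg hmem, pvG, if_pos he, hjlen]
    simp

-- B's second pass computes pvN
lemma alt_fold (contacts : List (List String)) (l : List (List String)) (j : Nat)
    (hdrop : contacts.drop j = l) (ans : Int) :
    ((PySem.List.enumerate l (j : Int)).foldl
      (fun ans p =>
        if (PySem.Set.len (PySem.Set.ofList p.2) == (p.2.length : Int))
             && p.2.all (fun e =>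
               PySem.Dict.get?
                 ((PySem.List.enumerate contacts 0).foldl
                   (fun d p => p.2.foldl (fun d e => PySem.Dict.setdefault d e p.1) d)
                   PySem.Dict.empty) e == some p.1)
        then ans + 1 else ans)
      ans) = ans + pvN ((contacts.take j).flatten) l := by
  induction l generalizing j ans with
  | nil => simp [PySem.List.enumerate_nil, pvN]
  | cons g rest ih =>
    rw [PySem.List.enumerate_cons, List.foldl_cons]
    have hcond :
        ((PySem.Set.len (PySem.Set.ofList g) == (g.length : Int))
          && g.all (fun e =>
            PySem.Dict.get?
              ((PySem.List.enumerate contacts 0).foldl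
                (fun d p => p.2.foldl (fun d e => PySem.Dict.setdefault d e p.1) d)
                PySem.Dict.empty) e == some (j : Int)) ) = true
        ↔ ((∀ e ∈ g, e ∉ (contacts.take j).flatten) ∧ g.Nodup) := by
      rw [Bool.and_eq_true, beq_iff_eq, len_ofList_eq_iff, List.all_eq_true]
      constructor
      · rintro ⟨hnd, hall⟩
        refine ⟨fun e he => ?_, hnd⟩
        have hge := hall e he
        rw [beq_iff_eq, build_first,
          if_neg (by simp [PySem.Dict.contains_empty])] at hge
        exact (pvG_eq_iff contacts j g rest hdrop e he).1 hge
      · rintro ⟨hall, hnd⟩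
        refine ⟨hnd, fun e he => ?_⟩
        rw [beq_iff_eq, build_first, if_neg (by simp [PySem.Dict.contains_empty])]
        exact (pvG_eq_iff contacts j g rest hdrop e he).2 (hall e he)
    have hdrop' : contacts.drop (j + 1) = rest := by
      rw [← List.drop_drop, hdrop]; rfl
    have htake : (contacts.take (j + 1)).flatten = (contacts.take j).flatten ++ g := by
      have hjlt : j < contacts.length := by
        by_contra h
        rw [List.drop_eq_nil_of_le (by omega)] at hdrop
        simp at hdrop
      have hsucc : contacts.take (j + 1) = contacts.take j ++ [contacts[j]] :=
        List.take_succ_eq_append_getElem hjlt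
      have hg : contacts[j] = g := by
        have h1 : contacts[j]? = some g := by
          rw [← List.head?_drop, hdrop]; rfl
        simpa [List.getElem?_eq_getElem hjlt] using h1
      rw [hsucc, hg, List.flatten_append, List.flatten_cons, List.flatten_nil, List.append_nil]
    have hcast : (j : Int) + 1 = ((j + 1 : Nat) : Int) := by push_cast; ring
    rw [hcast, ih (j + 1) hdrop' _, htake, pvN]
    by_cases h : (∀ e ∈ g, e ∉ (contacts.take j).flatten) ∧ g.Nodup
    · rw [if_pos (hcond.2 h), if_pos h]; ring
    · rw [if_neg (fun hb => h (hcond.1 hb)), if_neg h]; ring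

lemma alt_eq_pvN (contacts : List (List String)) : solve_alt contacts = pvN [] contacts := by
  unfold solve_alt
  have := alt_fold contacts contacts 0 (by simp) 0
  simpa using this

-- ===== VERDICT (by name: the statement is the Claim_ definition above) =====
theorem solve_spec : Claim_equal_solve := by
  intro contacts _
  unfold Spec_solve
  rw [solve_eq_pvN, alt_eq_pvN]
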